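-- pv_equiv track=rewrite | github.com/yanshengjia/algorithm | amazon/Substrings of size K with K distinct chars.py | unique_substring_2
-- ===== SOURCE A (Python) =====
-- def unique_substring_2(s: str, k: int) -> list:
--     if not s or k == 0:
--         return []
--
--     l = len(s)
--     char = dict()
--     res = []
--     i, j = 0, 0
--     while i <= j and j < l:
--         char[s[j]] = char.get(s[j], 0) + 1
--         while char[s[j]] > 1:  # cur window not valid, push i forward
--             char[s[i]] -= 1
--             i += 1
--
--         if j - i + 1 == k:
--             sub_s = s[i:j+1]
--             if sub_s not in res:
--                 res.append(sub_s)
--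
--             # i quit
--             char[s[i]] -= 1
--             i += 1
--
--         j += 1
--     return res
-- ===== SOURCE B (Python) =====
-- def unique_substring_2(s: str, k: int) -> list:
--     if not s or k <= 0:
--         return []
--     res = []
--     for i in range(len(s) - k + 1):
--         sub = s[i:i + k]
--         if len(set(sub)) == k and sub not in res:
--             res.append(sub)
--     return res
-- ===== Notes on version B (the rewrite author's own statement) =====
-- stated objective: simpler
-- what changed: Replaced A's incremental two-pointer sliding window with a maintained character-frequency dict by a direct loop over all window starts that recomputes len(set(sub)) independently for each length-k slice.
import Mathlib
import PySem

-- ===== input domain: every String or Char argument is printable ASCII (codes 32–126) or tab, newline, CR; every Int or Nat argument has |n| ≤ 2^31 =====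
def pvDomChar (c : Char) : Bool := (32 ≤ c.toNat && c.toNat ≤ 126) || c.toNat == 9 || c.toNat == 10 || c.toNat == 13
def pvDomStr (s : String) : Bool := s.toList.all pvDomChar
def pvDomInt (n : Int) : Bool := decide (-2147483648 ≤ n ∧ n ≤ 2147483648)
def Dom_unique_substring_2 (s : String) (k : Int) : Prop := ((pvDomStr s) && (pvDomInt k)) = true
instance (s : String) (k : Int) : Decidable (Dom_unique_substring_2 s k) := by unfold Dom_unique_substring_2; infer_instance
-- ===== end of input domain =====

-- B replaces A's incremental sliding window (two pointers + frequency dict) by an independent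
-- per-window distinctness check (len(set(sub)) == k for each start); objective: simpler.

-- ===== PORT A =====
-- inner `while char[s[j]] > 1` loop; fuel `j + 1 - i` always suffices on reachable states
-- (the loop moves i at most up to j, where the count of s[j] is 1).  s[i] / s[j] are ported
-- as l.getD _ ' ' — exact, since A only reads them for indices ≤ j < len(s) on reachable states.
def innerA (l : List Char) (cj : Char) : Nat → PySem.Dict Char Int → Nat → PySem.Dict Char Int × Nat
  | 0, ch, i => (ch, i)
  | fuel+1, ch, i =>
    if 1 < ch.getD cj 0 then
      innerA l cj fuel (ch.insert (l.getD i ' ') (ch.getD (l.getD i ' ') 0 - 1)) (i+1)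
    else (ch, i)

-- outer `while i <= j and j < l` loop; fuel n suffices since j increments every iteration.
def outerA (l : List Char) (k : Int) (n : Nat) : Nat → Nat → Nat → PySem.Dict Char Int → List String → List String
  | 0, _, _, _, res => res
  | fuel+1, i, j, ch, res =>
    if i ≤ j ∧ j < n then
      let cj := l.getD j ' '
      let r := innerA l cj (j + 1 - i) (ch.insert cj (ch.getD cj 0 + 1)) i
      if (j : Int) - (r.2 : Int) + 1 = k then
        let sub := String.ofList (PySem.List.slice l (some (r.2 : Int)) (some ((j : Int) + 1)))
        let res2 := if sub ∈ res then res else res ++ [sub]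
        outerA l k n fuel (r.2 + 1) (j + 1)
          (r.1.insert (l.getD r.2 ' ') (r.1.getD (l.getD r.2 ' ') 0 - 1)) res2
      else
        outerA l k n fuel r.2 (j + 1) r.1 res
    else res

def unique_substring_2 (s : String) (k : Int) : List String :=
  if s.toList.isEmpty || k == 0 then []
  else outerA s.toList k s.toList.length s.toList.length 0 0 PySem.Dict.empty []

-- ===== PORT B =====
def unique_substring_2_alt (s : String) (k : Int) : List String :=
  if s.toList.isEmpty = true ∨ k ≤ 0 then []
  else
    (PySem.List.pyRange 0 ((s.toList.length : Int) - k + 1) 1).foldl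
      (fun res i =>
        let sub := PySem.List.slice s.toList (some i) (some (i + k))
        if PySem.Set.len (PySem.Set.ofList sub) = k ∧ String.ofList sub ∉ res
        then res ++ [String.ofList sub] else res) []

-- ===== PRECONDITION & SPEC =====
def Spec_unique_substring_2 (s : String) (k : Int) (out : List String) : Prop := out = unique_substring_2_alt s k
instance (s : String) (k : Int) (out : List String) : Decidable (Spec_unique_substring_2 s k out) := by unfold Spec_unique_substring_2; infer_instance

-- ===== CLAIM (what is proved, stated in full; the proofs are below) =====
def Claim_equal_unique_substring_2 : Prop := ∀ (s : String) (k : Int), Dom_unique_substring_2 s k → Spec_unique_substring_2 s k (unique_substring_2 s k)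

-- ===== LEMMAS AND PROOFS =====

-- window of characters l[a..b-1]
def pvWin (l : List Char) (a b : Nat) : List Char := (l.drop a).take (b - a)

-- the canonical per-start step both sides are reduced to
def pvF (l : List Char) (K : Nat) (res : List String) (p : Nat) : List String :=
  if ((l.drop p).take K).Nodup ∧ String.ofList ((l.drop p).take K) ∉ res
  then res ++ [String.ofList ((l.drop p).take K)] else res

lemma pvWin_snoc (l : List Char) (a b : Nat) (hab : a ≤ b) (hb : b < l.length) :
    pvWin l a (b+1) = pvWin l a b ++ [l.getD b ' '] := by
  unfold pvWin
  have h1 : b + 1 - a = (b - a) + 1 := by omega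
  rw [h1, List.take_add_one]
  have h2 : (l.drop a)[b-a]? = some l[b] := by
    rw [List.getElem?_drop]
    have : a + (b - a) = b := by omega
    rw [this, List.getElem?_eq_getElem hb]
  rw [h2, List.getD_eq_getElem?_getD, List.getElem?_eq_getElem hb]
  rfl

lemma pvWin_cons (l : List Char) (a b : Nat) (ha : a < l.length) (hab : a < b) :
    pvWin l a b = l.getD a ' ' :: pvWin l (a+1) b := by
  unfold pvWin
  rw [List.drop_eq_getElem_cons ha]
  have h1 : b - a = (b - (a+1)) + 1 := by omega
  rw [h1, List.take_succ_cons, List.getD_eq_getElem?_getD, List.getElem?_eq_getElem ha]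
  rfl

lemma pvLenOfList (w : List Char) : (PySem.Set.ofList w).length = w.length ↔ w.Nodup := by
  constructor
  · induction w using List.reverseRecOn with
    | nil => intro _; simp
    | append_singleton xs x ih =>
      intro h
      rw [PySem.Set.ofList_append_singleton] at h
      by_cases hc : x ∈ xs
      · exfalso
        have hle := PySem.Set.length_ofList_le xs
        have hm : x ∈ PySem.Set.ofList xs := (PySem.Set.mem_ofList xs x).2 hc
        have : (PySem.Set.ofList xs).add x = PySem.Set.ofList xs := by
          simp [PySem.Set.add, hm]
        rw [this] at h
        simp at h
        omega
      · have hm : x ∉ PySem.Set.ofList xs := fun hm => hc ((PySem.Set.mem_ofList xs x).1 hm)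
        have hadd : (PySem.Set.ofList xs).add x = PySem.Set.ofList xs ++ [x] := by
          simp [PySem.Set.add, hm]
        rw [hadd] at h
        simp at h
        refine List.Nodup.append (ih h) (by simp) ?_
        intro a ha hb
        simp at hb
        subst hb
        exact hc ha
  · intro h; rw [PySem.Set.ofList_eq_self_of_nodup w h]

lemma innerA_i_le (l : List Char) (cj : Char) :
    ∀ (fuel : Nat) (ch : PySem.Dict Char Int) (i : Nat),
      (innerA l cj fuel ch i).2 ≤ i + fuel := by
  intro fuel
  induction fuel with
  | zero => intro ch i; simp [innerA]
  | succ f ih =>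
    intro ch i
    rw [innerA]
    split
    · exact le_trans (ih _ _) (by omega)
    · exact Nat.le_add_right i (f+1)

lemma innerA_spec (l : List Char) (j : Nat) (hj : j < l.length) :
    ∀ (fuel i : Nat) (ch : PySem.Dict Char Int),
      i ≤ j → j + 1 ≤ i + fuel →
      (∀ c, ch.getD c 0 = ((pvWin l i (j+1)).count c : Int)) →
      (pvWin l i j).Nodup →
      i ≤ (innerA l (l.getD j ' ') fuel ch i).2 ∧
      (innerA l (l.getD j ' ') fuel ch i).2 ≤ j ∧
      (∀ c, (innerA l (l.getD j ' ') fuel ch i).1.getD c 0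
          = ((pvWin l (innerA l (l.getD j ' ') fuel ch i).2 (j+1)).count c : Int)) ∧
      (pvWin l (innerA l (l.getD j ' ') fuel ch i).2 (j+1)).Nodup ∧
      (∀ p, i ≤ p → p < (innerA l (l.getD j ' ') fuel ch i).2 →
        1 < (pvWin l p (j+1)).count (l.getD j ' ')) := by
  intro fuel
  induction fuel with
  | zero => intro i ch hij hfuel _ _; omega
  | succ f ih =>
    intro i ch hij hfuel hcount hnodup
    rw [innerA]
    by_cases hg : 1 < ch.getD (l.getD j ' ') 0
    · -- guard true: s[j] occurs at least twice in the window [i..j]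
      have hsnoc : pvWin l i (j+1) = pvWin l i j ++ [l.getD j ' '] := pvWin_snoc l i j hij hj
      have hcnt2 : 1 < ((pvWin l i (j+1)).count (l.getD j ' ') : Int) := by
        rw [← hcount]; exact hg
      have hcnt2' : 1 < (pvWin l i (j+1)).count (l.getD j ' ') := by exact_mod_cast hcnt2
      have heq : (pvWin l i (j+1)).count (l.getD j ' ')
          = (pvWin l i j).count (l.getD j ' ') + 1 := by
        rw [hsnoc, List.count_append]; simp
      have hmem : l.getD j ' ' ∈ pvWin l i j :=
        List.count_pos_iff.1 (by omega)
      have hij' : i < j := by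
        rcases Nat.lt_or_ge i j with h | h
        · exact h
        · exfalso
          have : pvWin l i j = [] := by
            unfold pvWin
            have : j - i = 0 := by omega
            simp [this]
          rw [this] at hmem
          exact absurd hmem (List.not_mem_nil)
      have hi_lt : i < l.length := lt_trans hij' hj
      have hconsj : pvWin l i (j+1) = l.getD i ' ' :: pvWin l (i+1) (j+1) :=
        pvWin_cons l i (j+1) hi_lt (by omega)
      have hcons : pvWin l i j = l.getD i ' ' :: pvWin l (i+1) j :=
        pvWin_cons l i j hi_lt hij'
      simp only [hg, if_true]
      have hcount' : ∀ c, (ch.insert (l.getD i ' ') (ch.getD (l.getD i ' ') 0 - 1)).getD c 0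
          = ((pvWin l (i+1) (j+1)).count c : Int) := by
        intro c
        rw [PySem.Dict.getD_insert]
        by_cases hc : c = l.getD i ' '
        · subst hc
          rw [if_pos rfl, hcount _, hconsj, List.count_cons_self]
          push_cast; ring
        · rw [if_neg hc, hcount c, hconsj,
              List.count_cons_of_ne (fun h => hc h.symm)]
      have hnodup' : (pvWin l (i+1) j).Nodup := by
        rw [hcons] at hnodup; exact hnodup.of_cons
      have hrec := ih (i+1) _ (by omega) (by omega) hcount' hnodup'
      refine ⟨by omega, hrec.2.1, hrec.2.2.1, hrec.2.2.2.1, ?_⟩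
      intro p hp1 hp2
      rcases Nat.eq_or_lt_of_le hp1 with h | h
      · subst h; exact hcnt2'
      · exact hrec.2.2.2.2 p h hp2
    · -- guard false: window [i..j] is duplicate free
      simp only [hg, if_false]
      refine ⟨le_refl _, hij, hcount, ?_, by omega⟩
      have hsnoc : pvWin l i (j+1) = pvWin l i j ++ [l.getD j ' '] := pvWin_snoc l i j hij hj
      have hle : ((pvWin l i (j+1)).count (l.getD j ' ') : Int) ≤ 1 := by
        rw [← hcount]; omega
      have hle' : (pvWin l i (j+1)).count (l.getD j ' ') ≤ 1 := by exact_mod_cast hle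
      rw [hsnoc]
      refine List.Nodup.append hnodup (by simp) ?_
      intro a ha hb
      simp at hb
      subst hb
      have heq : (pvWin l i (j+1)).count (l.getD j ' ')
          = (pvWin l i j).count (l.getD j ' ') + 1 := by
        rw [hsnoc, List.count_append]; simp
      have : 0 < (pvWin l i j).count (l.getD j ' ') := List.count_pos_iff.2 ha
      omega

lemma pvRangeDropCons (m t : Nat) (h : t < m) :
    (List.range m).drop t = t :: (List.range m).drop (t+1) := by
  rw [List.drop_eq_getElem_cons (by simpa using h)]
  simp

lemma outerA_spec (l : List Char) (K : Nat) (hK : 1 ≤ K) :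
    ∀ (fuel j i : Nat) (ch : PySem.Dict Char Int) (res : List String),
      fuel = l.length - j → j ≤ l.length → i ≤ j →
      (∀ c, ch.getD c 0 = ((pvWin l i j).count c : Int)) →
      (pvWin l i j).Nodup →
      j + 1 ≤ i + K →
      (∀ p, p < i → j < p + K → ¬ ((l.drop p).take K).Nodup) →
      outerA l (K : Int) l.length fuel i j ch res
        = ((List.range (l.length + 1 - K)).drop (j + 1 - K)).foldl (pvF l K) res := by
  intro fuel
  induction fuel with
  | zero =>
    intro j i ch res hfuel hjle hij hcount hnodup hI4 hI5
    rw [outerA]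
    rw [List.drop_eq_nil_of_le (by simp; omega), List.foldl_nil]
  | succ f ih =>
    intro j i ch res hfuel hjle hij hcount hnodup hI4 hI5
    have hjn : j < l.length := by omega
    rw [outerA, if_pos (⟨hij, hjn⟩ : i ≤ j ∧ j < l.length)]
    show (if (j:Int) - ((innerA l (l.getD j ' ') (j + 1 - i) (ch.insert (l.getD j ' ') (ch.getD (l.getD j ' ') 0 + 1)) i).2 : Int) + 1 = (K:Int) then _ else _) = _
    have hcount1 : ∀ c, (ch.insert (l.getD j ' ') (ch.getD (l.getD j ' ') 0 + 1)).getD c 0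
        = ((pvWin l i (j+1)).count c : Int) := by
      intro c
      rw [PySem.Dict.getD_insert, pvWin_snoc l i j hij hjn, List.count_append, List.count_singleton]
      by_cases hc : c = l.getD j ' '
      · rw [if_pos hc, hc, hcount]
        simp
      · rw [if_neg hc, hcount]
        have hne : ¬ ((l.getD j ' ' == c) = true) := by
          simp only [beq_iff_eq]
          exact fun h => hc h.symm
        rw [if_neg hne]
        push_cast; ring
    obtain ⟨h1, h2, h3, h4, h5⟩ :=
      innerA_spec l j hjn (j+1-i) i _ hij (by omega) hcount1 hnodup
    set r := innerA l (l.getD j ' ') (j + 1 - i) (ch.insert (l.getD j ' ') (ch.getD (l.getD j ' ') 0 + 1)) i with hrdef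
    by_cases hcap : (j : Int) - (r.2 : Int) + 1 = (K : Int)
    · rw [if_pos hcap]
      have hrK : r.2 + K = j + 1 := by omega
      have hslice : PySem.List.slice l (some (r.2:Int)) (some ((j:Int) + 1)) = (l.drop r.2).take K := by
        have hj1 : ((j:Int) + 1) = (r.2:Int) + (K:Int) := by omega
        rw [hj1]
        exact PySem.List.slice_natCast_add l r.2 K
      have hwK : j + 1 - r.2 = K := by omega
      have hnd : ((l.drop r.2).take K).Nodup := by
        have h4' := h4; unfold pvWin at h4'; rwa [hwK] at h4'
      show outerA l (K:Int) l.length f (r.2 + 1) (j + 1)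
            (r.1.insert (l.getD r.2 ' ') (r.1.getD (l.getD r.2 ' ') 0 - 1))
            (if String.ofList (PySem.List.slice l (some (r.2:Int)) (some ((j:Int) + 1))) ∈ res then res
             else res ++ [String.ofList (PySem.List.slice l (some (r.2:Int)) (some ((j:Int) + 1)))]) = _
      rw [hslice]
      have hr2n : r.2 < l.length := by omega
      have hcons : pvWin l r.2 (j+1) = l.getD r.2 ' ' :: pvWin l (r.2+1) (j+1) :=
        pvWin_cons l r.2 (j+1) hr2n (by omega)
      have hcount2 : ∀ c, (r.1.insert (l.getD r.2 ' ') (r.1.getD (l.getD r.2 ' ') 0 - 1)).getD c 0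
          = ((pvWin l (r.2+1) (j+1)).count c : Int) := by
        intro c
        rw [PySem.Dict.getD_insert]
        by_cases hc : c = l.getD r.2 ' '
        · rw [if_pos hc, hc, h3, hcons, List.count_cons_self]
          push_cast; ring
        · rw [if_neg hc, h3, hcons, List.count_cons_of_ne (fun h => hc h.symm)]
      have hnodup2 : (pvWin l (r.2+1) (j+1)).Nodup := by
        rw [hcons] at h4; exact h4.of_cons
      have hres2 : (if String.ofList ((l.drop r.2).take K) ∈ res then res
          else res ++ [String.ofList ((l.drop r.2).take K)]) = pvF l K res r.2 := by
        by_cases hm : String.ofList ((l.drop r.2).take K) ∈ res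
        · simp [pvF, hm]
        · simp [pvF, hm, hnd]
      rw [hres2]
      have hI5' : ∀ p, p < r.2 + 1 → j + 1 < p + K → ¬ ((l.drop p).take K).Nodup := by
        intro p hp hpk
        exact absurd hrK (by omega)
      rw [ih (j+1) (r.2+1) _ (pvF l K res r.2) (by omega) (by omega) (by omega) hcount2 hnodup2 (by omega) hI5']
      have ht : j + 1 - K = r.2 := by omega
      rw [pvRangeDropCons (l.length + 1 - K) (j + 1 - K) (by omega), List.foldl_cons, ht,
          show j + 1 + 1 - K = r.2 + 1 from by omega]
    · rw [if_neg hcap]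
      have hgt : j + 1 < r.2 + K := by omega
      have hI5' : ∀ p, p < r.2 → j < p + K → ¬ ((l.drop p).take K).Nodup := by
        intro p hpi hpk
        by_cases hpi' : p < i
        · exact hI5 p hpi' hpk
        · have hcnt := h5 p (by omega) hpi
          intro hnd
          have hpref : (l.drop p).take (j+1-p) <+: (l.drop p).take K :=
            List.take_prefix_take_left (by omega : j+1-p ≤ K)
          have hnd' := List.Nodup.sublist hpref.sublist hnd
          have hle1 := List.nodup_iff_count_le_one.1 hnd' (l.getD j ' ')
          unfold pvWin at hcnt
          omega
      rw [ih (j+1) r.2 r.1 res (by omega) (by omega) (by omega) h3 h4 (by omega)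
          (fun p hp hpk => hI5' p hp (by omega))]
      by_cases hjK : K ≤ j + 1
      · have hnotnd : ¬ ((l.drop (j+1-K)).take K).Nodup := hI5' (j+1-K) (by omega) (by omega)
        rw [pvRangeDropCons (l.length + 1 - K) (j+1-K) (by omega), List.foldl_cons]
        have hstep : pvF l K res (j+1-K) = res := by simp [pvF, hnotnd]
        rw [hstep, show j + 1 + 1 - K = (j + 1 - K) + 1 from by omega]
      · rw [show j + 1 + 1 - K = j + 1 - K from by omega]

lemma outerA_neg (l : List Char) (k : Int) (hk : k < 0) :
    ∀ (fuel i j : Nat) (ch : PySem.Dict Char Int) (res : List String),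
      outerA l k l.length fuel i j ch res = res := by
  intro fuel
  induction fuel with
  | zero => intro i j ch res; rw [outerA]
  | succ f ih =>
    intro i j ch res
    rw [outerA]
    by_cases hg : i ≤ j ∧ j < l.length
    · rw [if_pos hg]
      show (if (j:Int) - ((innerA l (l.getD j ' ') (j + 1 - i) (ch.insert (l.getD j ' ') (ch.getD (l.getD j ' ') 0 + 1)) i).2 : Int) + 1 = k then _ else _) = _
      set r := innerA l (l.getD j ' ') (j + 1 - i) (ch.insert (l.getD j ' ') (ch.getD (l.getD j ' ') 0 + 1)) i with hrdef
      have hle : r.2 ≤ i + (j + 1 - i) := innerA_i_le l (l.getD j ' ') (j + 1 - i) _ i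
      have hne : ¬ ((j:Int) - (r.2 : Int) + 1 = k) := by
        have : r.2 ≤ j + 1 := by omega
        omega
      rw [if_neg hne]
      exact ih r.2 (j+1) r.1 res
    · rw [if_neg hg]

lemma alt_spec (s : String) (K : Nat) (hK : 1 ≤ K) (hs : ¬ s.toList.isEmpty) :
    unique_substring_2_alt s (K : Int)
      = (List.range (s.toList.length + 1 - K)).foldl (pvF s.toList K) [] := by
  unfold unique_substring_2_alt
  rw [if_neg (by rintro (h | h); exacts [hs h, by omega])]
  rw [PySem.List.pyRange_one, List.foldl_map]
  have hlen : (((s.toList.length : Int) - (K : Int) + 1) - 0).toNat = s.toList.length + 1 - K := by omega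
  rw [hlen]
  apply PySem.List.foldl_congr_mem
  intro res m hm
  have hmlt : m < s.toList.length + 1 - K := by simpa using hm
  have hmn : m + K ≤ s.toList.length := by omega
  simp only [zero_add]
  rw [PySem.List.slice_natCast_add]
  have hwlen : ((s.toList.drop m).take K).length = K := by
    rw [List.length_take, List.length_drop]
    omega
  have hcond : (PySem.Set.len (PySem.Set.ofList ((s.toList.drop m).take K)) = (K:Int))
      ↔ ((s.toList.drop m).take K).Nodup := by
    rw [← pvLenOfList, hwlen]
    constructor
    · intro h
      have : ((PySem.Set.ofList ((s.toList.drop m).take K)).length : Int) = (K : Int) := by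
        simpa [PySem.Set.len] using h
      exact_mod_cast this
    · intro h
      simp [PySem.Set.len, h]
  unfold pvF
  by_cases hnd : ((s.toList.drop m).take K).Nodup
  · by_cases hmem : String.ofList ((s.toList.drop m).take K) ∈ res
    · rw [if_neg (by simp [hmem]), if_neg (by simp [hmem])]
    · rw [if_pos ⟨hcond.2 hnd, hmem⟩, if_pos ⟨hnd, hmem⟩]
  · rw [if_neg (fun hc => hnd (hcond.1 hc.1)), if_neg (fun hc => hnd hc.1)]

-- ===== VERDICT (by name: the statement is the Claim_ definition above) =====
theorem unique_substring_2_spec : Claim_equal_unique_substring_2 := by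
  intro s k _
  unfold Spec_unique_substring_2
  by_cases hs : s.toList.isEmpty
  · unfold unique_substring_2 unique_substring_2_alt
    rw [if_pos (by simp [hs]), if_pos (Or.inl hs)]
  · by_cases hk0 : k = 0
    · unfold unique_substring_2 unique_substring_2_alt
      subst hk0
      rw [if_pos (by simp), if_pos (Or.inr (le_refl 0))]
    · rcases lt_or_gt_of_ne hk0 with hkneg | hkpos
      · -- k < 0: A's window never reaches the (negative) size k; B's guard returns []
        unfold unique_substring_2 unique_substring_2_alt
        rw [if_neg (by simp [hs, hk0]), if_pos (Or.inr (le_of_lt hkneg))]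
        rw [outerA_neg s.toList k hkneg]
      · -- k ≥ 1
        have hK : k = ((k.toNat : Nat) : Int) := by omega
        have hK1 : 1 ≤ k.toNat := by omega
        rw [hK]
        rw [alt_spec s k.toNat hK1 hs]
        unfold unique_substring_2
        rw [if_neg (by simp [hs]; omega)]
        rw [outerA_spec s.toList k.toNat hK1 s.toList.length 0 0 PySem.Dict.empty []
            (by omega) (by omega) (by omega)
            (by intro c; simp [PySem.Dict.getD_empty, pvWin])
            (by simp [pvWin]) (by omega)
            (by intro p hp _; omega)]
        rw [show 0 + 1 - k.toNat = 0 from by omega, List.drop_zero]
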